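-- pv_equiv track=rewrite | github.com/Kamikazie98/whatsapp_integration | whatsapp_integration/whatsapp_integration/doctype/whatsapp_dashboard/whatsapp_dashboard.py | _summarize_sessions
-- ===== SOURCE A (Python) =====
-- def _summarize_sessions(sessions):
--     summary = {"total": 0, "connected": 0, "waiting": 0, "disconnected": 0}
--     for session in sessions:
--         summary["total"] += 1
--         status = (session.get("status") or "").lower()
--         if status == "connected":
--             summary["connected"] += 1
--         elif status in {"waiting for scan", "waiting"}:
--             summary["waiting"] += 1
--         else:
--             summary["disconnected"] += 1
--     return summary
-- ===== SOURCE B (Python) =====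
-- def _label(session):
--     status = (session.get("status") or "").lower()
--     if status == "connected":
--         return "connected"
--     if status in ("waiting for scan", "waiting"):
--         return "waiting"
--     return "disconnected"
--
--
-- def _summarize_sessions(sessions):
--     labels = [_label(session) for session in sessions]
--     return {
--         "total": len(labels),
--         "connected": labels.count("connected"),
--         "waiting": labels.count("waiting"),
--         "disconnected": labels.count("disconnected"),
--     }
-- ===== Notes on version B (the rewrite author's own statement) =====
-- stated objective: simpler
-- what changed: Instead of threading a mutable counter dict through one loop with in-place increments, B maps each session to a category label in a single pass and builds the result dict directly from len and per-label list.count scans.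
import Mathlib
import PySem

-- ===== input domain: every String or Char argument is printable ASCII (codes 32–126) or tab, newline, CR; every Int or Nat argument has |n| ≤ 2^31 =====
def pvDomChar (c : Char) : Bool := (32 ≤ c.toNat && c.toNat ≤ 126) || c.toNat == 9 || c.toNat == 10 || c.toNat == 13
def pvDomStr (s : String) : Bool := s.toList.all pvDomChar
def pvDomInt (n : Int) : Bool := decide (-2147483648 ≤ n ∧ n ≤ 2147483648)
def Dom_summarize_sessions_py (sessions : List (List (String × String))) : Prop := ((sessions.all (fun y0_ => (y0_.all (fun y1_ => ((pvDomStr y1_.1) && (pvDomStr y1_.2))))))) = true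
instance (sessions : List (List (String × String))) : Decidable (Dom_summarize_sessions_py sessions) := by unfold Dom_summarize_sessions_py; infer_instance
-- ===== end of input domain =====

-- ===== PORT A =====
def summarize_sessions_py (sessions : List (List (String × String))) : List (String × Int) :=
  let summary : PySem.Dict String Int :=
    ((((PySem.Dict.empty.insert "total" 0).insert "connected" 0).insert "waiting" 0).insert "disconnected" 0)
  let summary := sessions.foldl (fun summary session =>
    let summary := summary.modify "total" 0 (· + 1)
    let status := PySem.Str.lower (((PySem.Dict.mk session).get? "status").getD "")
    if status == "connected" then summary.modify "connected" 0 (· + 1)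
    else if status == "waiting for scan" || status == "waiting" then summary.modify "waiting" 0 (· + 1)
    else summary.modify "disconnected" 0 (· + 1)) summary
  summary.items

-- ===== PORT B =====
def pvLabel (session : List (String × String)) : String :=
  let status := PySem.Str.lower (((PySem.Dict.mk session).get? "status").getD "")
  if status == "connected" then "connected"
  else if status == "waiting for scan" || status == "waiting" then "waiting"
  else "disconnected"

def summarize_sessions_py_alt (sessions : List (List (String × String))) : List (String × Int) :=
  let labels := sessions.map pvLabel
  [("total", (labels.length : Int)),
   ("connected", (labels.count "connected" : Int)),
   ("waiting", (labels.count "waiting" : Int)),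
   ("disconnected", (labels.count "disconnected" : Int))]

-- ===== PRECONDITION & SPEC =====
def Spec_summarize_sessions_py (sessions : List (List (String × String))) (out : List (String × Int)) : Prop := out = summarize_sessions_py_alt sessions
instance (sessions : List (List (String × String))) (out : List (String × Int)) : Decidable (Spec_summarize_sessions_py sessions out) := by unfold Spec_summarize_sessions_py; infer_instance

-- ===== CLAIM (what is proved, stated in full; the proofs are below) =====
def Claim_equal_summarize_sessions_py : Prop := ∀ (sessions : List (List (String × String))), Dom_summarize_sessions_py sessions → Spec_summarize_sessions_py sessions (summarize_sessions_py sessions)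

-- ===== LEMMAS AND PROOFS =====

def pvMkD (a b c e : Int) : PySem.Dict String Int :=
  PySem.Dict.mk [("total", a), ("connected", b), ("waiting", c), ("disconnected", e)]

def pvStep (summary : PySem.Dict String Int) (session : List (String × String)) :
    PySem.Dict String Int :=
  let summary := summary.modify "total" 0 (· + 1)
  let status := PySem.Str.lower (((PySem.Dict.mk session).get? "status").getD "")
  if status == "connected" then summary.modify "connected" 0 (· + 1)
  else if status == "waiting for scan" || status == "waiting" then summary.modify "waiting" 0 (· + 1)
  else summary.modify "disconnected" 0 (· + 1)

theorem pvStep_eq (s : List (String × String)) (a b c e : Int) :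
    pvStep (pvMkD a b c e) s =
      if pvLabel s = "connected" then pvMkD (a + 1) (b + 1) c e
      else if pvLabel s = "waiting" then pvMkD (a + 1) b (c + 1) e
      else pvMkD (a + 1) b c (e + 1) := by
  unfold pvStep pvLabel
  set st := PySem.Str.lower (((PySem.Dict.mk s).get? "status").getD "") with hst
  by_cases h1 : st = "connected" <;> by_cases h2 : st = "waiting for scan" <;>
    by_cases h3 : st = "waiting" <;>
    simp [h1, h2, h3, pvMkD, PySem.Dict.modify, PySem.Dict.insert, PySem.Dict.getD,
      PySem.Dict.get?, PySem.Dict.contains]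

theorem pvLabel_cases (s : List (String × String)) :
    pvLabel s = "connected" ∨ pvLabel s = "waiting" ∨ pvLabel s = "disconnected" := by
  unfold pvLabel; dsimp only; split_ifs <;> simp

theorem pvMkD_inj {a b c e a' b' c' e' : Int} (h1 : a = a') (h2 : b = b') (h3 : c = c')
    (h4 : e = e') : pvMkD a b c e = pvMkD a' b' c' e' := by
  rw [h1, h2, h3, h4]

theorem pvFoldl_eq (sessions : List (List (String × String))) :
    ∀ (a b c e : Int),
      sessions.foldl pvStep (pvMkD a b c e) =
        pvMkD (a + sessions.length)
          (b + (sessions.map pvLabel).count "connected")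
          (c + (sessions.map pvLabel).count "waiting")
          (e + (sessions.map pvLabel).count "disconnected") := by
  induction sessions with
  | nil => intro a b c e; simp
  | cons s rest ih =>
    intro a b c e
    simp only [List.foldl_cons, pvStep_eq, List.map_cons, List.length_cons]
    by_cases h1 : pvLabel s = "connected"
    · simp [h1, ih]
      apply pvMkD_inj <;> omega
    · by_cases h2 : pvLabel s = "waiting"
      · simp [h2, ih]
        apply pvMkD_inj <;> omega
      · have h3 : pvLabel s = "disconnected" := by
          rcases pvLabel_cases s with h | h | h <;> simp_all
        simp [h3, ih]
        apply pvMkD_inj <;> omega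

-- ===== VERDICT (by name: the statement is the Claim_ definition above) =====
theorem summarize_sessions_py_spec : Claim_equal_summarize_sessions_py := by
  intro sessions _
  unfold Spec_summarize_sessions_py summarize_sessions_py summarize_sessions_py_alt
  show (sessions.foldl pvStep (pvMkD 0 0 0 0)).items = _
  rw [pvFoldl_eq]
  simp [pvMkD]
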